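-- pv_equiv track=rewrite | github.com/vidstige/aoc | 2017/22.py | grid2lines
-- ===== SOURCE A (Python) =====
-- def grid2lines(grid, p=None):
--     max_x = max(x for x, y in grid)
--     max_y = max(y for x, y in grid)
--     min_x = min(x for x, y in grid)
--     min_y = min(y for x, y in grid)
--     lines = []
--     for y in range(min_y, max_y + 1):
--         line = []
--         for x in range(min_x, max_x + 1):
--             if p == (x, y):
--                 line.append('O')
--             else:
--                 line.append('#' if (x, y) in grid else '.')
--         lines.append(' '.join(line))
--     return lines
-- ===== SOURCE B (Python) =====
-- def grid2lines(grid, p=None):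
--     max_x = max(x for x, y in grid)
--     max_y = max(y for x, y in grid)
--     min_x = min(x for x, y in grid)
--     min_y = min(y for x, y in grid)
--     width = max_x - min_x + 1
--     height = max_y - min_y + 1
--     canvas = [['.'] * width for _ in range(height)]
--     for x, y in grid:
--         canvas[y - min_y][x - min_x] = '#'
--     if p is not None:
--         x, y = p
--         if min_x <= x <= max_x and min_y <= y <= max_y:
--             canvas[y - min_y][x - min_x] = 'O'
--     return [' '.join(row) for row in canvas]
-- ===== Notes on version B (the rewrite author's own statement) =====
-- stated objective: faster
-- what changed: Instead of scanning every cell of the bounding box and doing a linear membership test in grid for each (O(area*n)), B allocates a '.'-filled canvas and makes one pass over the point list marking '#', then overwrites p's cell with 'O' if it is in range.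
import Mathlib
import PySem

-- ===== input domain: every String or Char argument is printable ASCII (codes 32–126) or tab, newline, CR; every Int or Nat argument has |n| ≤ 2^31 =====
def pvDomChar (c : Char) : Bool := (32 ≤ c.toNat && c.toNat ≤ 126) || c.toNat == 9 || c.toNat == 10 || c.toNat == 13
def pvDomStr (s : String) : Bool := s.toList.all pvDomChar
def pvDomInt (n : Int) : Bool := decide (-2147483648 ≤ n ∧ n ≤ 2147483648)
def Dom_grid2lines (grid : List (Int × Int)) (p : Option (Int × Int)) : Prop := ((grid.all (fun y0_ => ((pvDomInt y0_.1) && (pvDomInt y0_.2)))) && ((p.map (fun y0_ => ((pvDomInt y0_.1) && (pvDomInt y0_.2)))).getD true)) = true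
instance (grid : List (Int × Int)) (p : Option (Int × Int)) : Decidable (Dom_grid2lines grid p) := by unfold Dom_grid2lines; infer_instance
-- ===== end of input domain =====

-- B replaces A's per-cell linear membership scan over the whole bounding box by a '.'-filled
-- canvas marked in one pass over the point list ('#'), with p's cell overwritten last ('O').

-- ===== PORT A =====
def grid2lines (grid : List (Int × Int)) (p : Option (Int × Int)) : List String :=
  let max_x := (PySem.List.max? (grid.map Prod.fst) (fun v => v)).getD 0
  let max_y := (PySem.List.max? (grid.map Prod.snd) (fun v => v)).getD 0
  let min_x := (PySem.List.min? (grid.map Prod.fst) (fun v => v)).getD 0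
  let min_y := (PySem.List.min? (grid.map Prod.snd) (fun v => v)).getD 0
  (PySem.List.pyRange min_y (max_y + 1) 1).foldl (fun lines y =>
    let line := (PySem.List.pyRange min_x (max_x + 1) 1).foldl (fun line x =>
      line ++ [if p = some (x, y) then "O"
               else if (x, y) ∈ grid then "#" else "."]) []
    lines ++ [PySem.Str.join " " line]) []

-- ===== PORT B =====
-- one marking step: canvas[y - min_y][x - min_x] = "#"
def pvMark (min_x min_y : Int) (cv : List (List String)) (q : Int × Int) : List (List String) :=
  cv.modify ((q.2 - min_y).toNat) (fun row => row.set ((q.1 - min_x).toNat) "#")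

def grid2lines_alt (grid : List (Int × Int)) (p : Option (Int × Int)) : List String :=
  let max_x := (PySem.List.max? (grid.map Prod.fst) (fun v => v)).getD 0
  let max_y := (PySem.List.max? (grid.map Prod.snd) (fun v => v)).getD 0
  let min_x := (PySem.List.min? (grid.map Prod.fst) (fun v => v)).getD 0
  let min_y := (PySem.List.min? (grid.map Prod.snd) (fun v => v)).getD 0
  let width := (max_x - min_x + 1).toNat
  let height := (max_y - min_y + 1).toNat
  let canvas0 := List.replicate height (List.replicate width ".")
  let canvas1 := grid.foldl (pvMark min_x min_y) canvas0
  let canvas2 := match p with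
    | none => canvas1
    | some (x, y) =>
      if min_x ≤ x ∧ x ≤ max_x ∧ min_y ≤ y ∧ y ≤ max_y then
        canvas1.modify ((y - min_y).toNat) (fun row => row.set ((x - min_x).toNat) "O")
      else canvas1
  canvas2.map (fun row => PySem.Str.join " " row)

-- ===== PRECONDITION & SPEC =====
-- Pre_ excludes the empty list, on which Python's max() raises ValueError (both A and B raise there).
def Pre_grid2lines (grid : List (Int × Int)) (p : Option (Int × Int)) : Prop := grid ≠ []
instance (grid : List (Int × Int)) (p : Option (Int × Int)) : Decidable (Pre_grid2lines grid p) := by unfold Pre_grid2lines; infer_instance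
def pvWitness_grid2lines : (List (Int × Int)) × (Option (Int × Int)) := ([(0, 0), (2, 1)], some (1, 1))

def Spec_grid2lines (grid : List (Int × Int)) (p : Option (Int × Int)) (out : List String) : Prop := out = grid2lines_alt grid p
instance (grid : List (Int × Int)) (p : Option (Int × Int)) (out : List String) : Decidable (Spec_grid2lines grid p out) := by unfold Spec_grid2lines; infer_instance

-- ===== CLAIM (what is proved, stated in full; the proofs are below) =====
def Claim_equal_grid2lines : Prop := ∀ (grid : List (Int × Int)) (p : Option (Int × Int)), Dom_grid2lines grid p → Pre_grid2lines grid p → Spec_grid2lines grid p (grid2lines grid p)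

-- ===== LEMMAS AND PROOFS =====

-- flattened cell access
def pvCell (cv : List (List String)) (r c : Nat) : Option String :=
  cv[r]?.bind (fun row => row[c]?)

theorem pvCell_modify_set (cv : List (List String)) (W R C r c : Nat) (v : String)
    (hrow : ∀ (i : Nat) (row : List String), cv[i]? = some row → row.length = W) :
    pvCell (cv.modify R (fun row => row.set C v)) r c =
      if R = r ∧ C = c ∧ r < cv.length ∧ c < W then some v
      else pvCell cv r c := by
  unfold pvCell
  rw [List.getElem?_modify]
  by_cases hr : R = r
  · subst hr
    cases hcv : cv[R]? with
    | none =>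
      have h1 : ¬ R < cv.length := by simpa [List.getElem?_eq_none_iff] using hcv
      simp [hcv, h1]
    | some row =>
      have hRlt : R < cv.length := by
        by_contra h
        rw [List.getElem?_eq_none_iff.mpr (by omega)] at hcv; cases hcv
      have hlen : row.length = W := hrow R row hcv
      simp only [hcv, if_true, Option.map_eq_map, Option.map_some, Option.bind_some, true_and]
      rw [List.getElem?_set]
      by_cases hc : C = c
      · subst hc
        by_cases hclt : C < W
        · simp [hclt, hRlt, hlen]
        · simp [hclt, hRlt, hlen, List.getElem?_eq_none_iff.mpr (by omega : row.length ≤ C)]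
      · simp [hc]
  · simp only [hr]
    cases hcv : cv[r]? with
    | none => simp
    | some row => simp [hr]

theorem pvRows_modify_set (cv : List (List String)) (R C : Nat) (v : String) (W : Nat)
    (hrow : ∀ (i : Nat) (row : List String), cv[i]? = some row → row.length = W) :
    ∀ (i : Nat) (row : List String), (cv.modify R (fun row => row.set C v))[i]? = some row → row.length = W := by
  intro i row h
  rw [List.getElem?_modify] at h
  cases hcv : cv[i]? with
  | none => simp [hcv] at h
  | some row0 =>
    simp only [hcv, Option.map_some, Option.some_inj] at h
    have h0 := hrow i row0 hcv
    by_cases hR : R = i <;> simp [hR] at h <;> simp [← h, List.length_set, h0]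

theorem pvMark_length (min_x min_y : Int) (pts : List (Int × Int)) (cv : List (List String)) :
    (pts.foldl (pvMark min_x min_y) cv).length = cv.length := by
  induction pts generalizing cv with
  | nil => rfl
  | cons q t ih => simp [List.foldl_cons, ih, pvMark]

theorem pvMark_rows (min_x min_y : Int) (pts : List (Int × Int)) (cv : List (List String)) (W : Nat)
    (hrow : ∀ (i : Nat) (row : List String), cv[i]? = some row → row.length = W) :
    ∀ (i : Nat) (row : List String), (pts.foldl (pvMark min_x min_y) cv)[i]? = some row → row.length = W := by
  induction pts generalizing cv with
  | nil => exact hrow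
  | cons q t ih => exact ih _ (pvRows_modify_set cv _ _ _ _ hrow)

theorem pvMark_cell (min_x min_y : Int) (pts : List (Int × Int)) (cv : List (List String))
    (H W : Nat) (hH : cv.length = H)
    (hrow : ∀ (i : Nat) (row : List String), cv[i]? = some row → row.length = W)
    (hb : ∀ q ∈ pts, min_x ≤ q.1 ∧ (q.1 - min_x).toNat < W ∧ min_y ≤ q.2 ∧ (q.2 - min_y).toNat < H)
    (r c : Nat) (hr : r < H) (hc : c < W) :
    pvCell (pts.foldl (pvMark min_x min_y) cv) r c =
      if (min_x + (c : Int), min_y + (r : Int)) ∈ pts then some "#" else pvCell cv r c := by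
  induction pts generalizing cv with
  | nil => simp
  | cons q t ih =>
    obtain ⟨a, b⟩ := q
    obtain ⟨h1, h2, h3, h4⟩ := hb (a, b) (by simp)
    have hcv' : (pvMark min_x min_y cv (a, b)).length = H := by simp [pvMark, hH]
    have hrow' := pvRows_modify_set cv ((b - min_y).toNat) ((a - min_x).toNat) "#" W hrow
    rw [List.foldl_cons]
    rw [ih (pvMark min_x min_y cv (a, b)) hcv' hrow' (fun q' hq' => hb q' (by simp [hq']))]
    by_cases hmem : (min_x + (c : Int), min_y + (r : Int)) ∈ t
    · simp [hmem]
    · simp only [hmem, if_false, List.mem_cons, or_false]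
      unfold pvMark
      rw [pvCell_modify_set cv W _ _ _ _ _ hrow]
      have hiff : ((b - min_y).toNat = r ∧ (a - min_x).toNat = c ∧ r < cv.length ∧ c < W) ↔
          ((min_x + (c : Int), min_y + (r : Int)) = (a, b)) := by
        rw [hH]
        simp only [Prod.mk.injEq]
        omega
      exact if_congr hiff rfl rfl

theorem pvGrid_ext (cv : List (List String)) (H W : Nat) (g : Nat → Nat → String)
    (hlen : cv.length = H)
    (hrows : ∀ (i : Nat) (row : List String), cv[i]? = some row → row.length = W)
    (hcell : ∀ r c, r < H → c < W → pvCell cv r c = some (g r c)) :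
    cv = (List.range H).map (fun r => (List.range W).map (fun c => g r c)) := by
  apply List.ext_getElem?
  intro r
  by_cases hr : r < H
  · obtain ⟨row, hrow⟩ : ∃ row, cv[r]? = some row :=
      ⟨cv[r]'(by omega), List.getElem?_eq_getElem _⟩
    rw [hrow, List.getElem?_map, List.getElem?_range hr]
    simp only [Option.map_some, Option.some_inj]
    apply List.ext_getElem?
    intro c
    by_cases hc : c < W
    · have hcell' := hcell r c hr hc
      unfold pvCell at hcell'
      rw [hrow, Option.bind_some] at hcell'
      rw [hcell', List.getElem?_map, List.getElem?_range hc]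
      simp
    · rw [List.getElem?_eq_none_iff.mpr (by rw [hrows r row hrow]; omega),
        List.getElem?_eq_none_iff.mpr (by simp; omega)]
  · rw [List.getElem?_eq_none_iff.mpr (by omega),
      List.getElem?_eq_none_iff.mpr (by simp; omega)]

-- ===== VERDICT (by name: the statement is the Claim_ definition above) =====
theorem grid2lines_spec : Claim_equal_grid2lines := by
  intro grid p hdom hpre
  unfold Spec_grid2lines
  simp only [grid2lines, grid2lines_alt]
  obtain ⟨mx, hmx⟩ : ∃ m, PySem.List.max? (grid.map Prod.fst) (fun v => v) = some m := by
    cases h : PySem.List.max? (grid.map Prod.fst) (fun v => v) with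
    | none => exact absurd (by simpa using (PySem.List.max?_eq_none_iff _ _).mp h) hpre
    | some m => exact ⟨m, rfl⟩
  obtain ⟨my, hmy⟩ : ∃ m, PySem.List.max? (grid.map Prod.snd) (fun v => v) = some m := by
    cases h : PySem.List.max? (grid.map Prod.snd) (fun v => v) with
    | none => exact absurd (by simpa using (PySem.List.max?_eq_none_iff _ _).mp h) hpre
    | some m => exact ⟨m, rfl⟩
  obtain ⟨nx, hnx⟩ : ∃ m, PySem.List.min? (grid.map Prod.fst) (fun v => v) = some m := by
    cases h : PySem.List.min? (grid.map Prod.fst) (fun v => v) with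
    | none => exact absurd (by simpa using (PySem.List.min?_eq_none_iff _ _).mp h) hpre
    | some m => exact ⟨m, rfl⟩
  obtain ⟨ny, hny⟩ : ∃ m, PySem.List.min? (grid.map Prod.snd) (fun v => v) = some m := by
    cases h : PySem.List.min? (grid.map Prod.snd) (fun v => v) with
    | none => exact absurd (by simpa using (PySem.List.min?_eq_none_iff _ _).mp h) hpre
    | some m => exact ⟨m, rfl⟩
  rw [hmx, hmy, hnx, hny]
  simp only [Option.getD_some]
  -- bounds of every grid point
  have hb : ∀ q ∈ grid, nx ≤ q.1 ∧ q.1 ≤ mx ∧ ny ≤ q.2 ∧ q.2 ≤ my := by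
    intro q hq
    exact ⟨PySem.List.min?_isMin hnx q.1 (List.mem_map_of_mem hq),
      PySem.List.max?_isMax hmx q.1 (List.mem_map_of_mem hq),
      PySem.List.min?_isMin hny q.2 (List.mem_map_of_mem hq),
      PySem.List.max?_isMax hmy q.2 (List.mem_map_of_mem hq)⟩
  obtain ⟨q0, hq0⟩ := List.exists_mem_of_ne_nil grid hpre
  have hq0b := hb q0 hq0
  have hWH : nx ≤ mx ∧ ny ≤ my := ⟨le_trans hq0b.1 hq0b.2.1, le_trans hq0b.2.2.1 hq0b.2.2.2⟩
  -- canvas facts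
  have hlen1 : (grid.foldl (pvMark nx ny)
      (List.replicate (my - ny + 1).toNat (List.replicate (mx - nx + 1).toNat "."))).length
      = (my - ny + 1).toNat := by
    rw [pvMark_length]; simp
  have hrows0 : ∀ (i : Nat) (row : List String),
      (List.replicate (my - ny + 1).toNat (List.replicate (mx - nx + 1).toNat "."))[i]? = some row →
      row.length = (mx - nx + 1).toNat := by
    intro i row h
    rw [List.getElem?_replicate] at h
    split at h
    · cases h; simp
    · cases h
  have hrows1 : ∀ (i : Nat) (row : List String),
      (grid.foldl (pvMark nx ny)
        (List.replicate (my - ny + 1).toNat (List.replicate (mx - nx + 1).toNat ".")))[i]? = some row →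
      row.length = (mx - nx + 1).toNat :=
    pvMark_rows nx ny grid _ _ hrows0
  have hcell1 : ∀ r c, r < (my - ny + 1).toNat → c < (mx - nx + 1).toNat →
      pvCell (grid.foldl (pvMark nx ny)
        (List.replicate (my - ny + 1).toNat (List.replicate (mx - nx + 1).toNat "."))) r c
      = some (if (nx + (c : Int), ny + (r : Int)) ∈ grid then "#" else ".") := by
    intro r c hr hc
    rw [pvMark_cell nx ny grid _ (my - ny + 1).toNat (mx - nx + 1).toNat (by simp) hrows0
      (fun q hq => by have := hb q hq; omega) r c hr hc]
    unfold pvCell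
    rw [List.getElem?_replicate, if_pos hr, Option.bind_some, List.getElem?_replicate, if_pos hc]
    split <;> rfl
  -- A's nested foldl is a nested map over the two ranges
  simp only [PySem.List.foldl_append_singleton_eq_map, List.nil_append, PySem.List.pyRange_one,
    List.map_map, Function.comp]
  have hHeq : (my + 1 - ny).toNat = (my - ny + 1).toNat := by omega
  have hWeq : (mx + 1 - nx).toNat = (mx - nx + 1).toNat := by omega
  rw [hHeq, hWeq]
  -- now compare cell by cell, case by case on p
  split
  · -- p = none
    rw [pvGrid_ext _ (my - ny + 1).toNat (mx - nx + 1).toNat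
      (fun r c => if (nx + (c : Int), ny + (r : Int)) ∈ grid then "#" else ".")
      hlen1 hrows1 hcell1]
    simp [List.map_map, Function.comp_def]
  · -- p = some (x, y)
    rename_i x y
    by_cases hin : nx ≤ x ∧ x ≤ mx ∧ ny ≤ y ∧ y ≤ my
    · rw [if_pos hin]
      rw [pvGrid_ext _ (my - ny + 1).toNat (mx - nx + 1).toNat
        (fun r c => if some (x, y) = some (nx + (c : Int), ny + (r : Int)) then "O"
          else if (nx + (c : Int), ny + (r : Int)) ∈ grid then "#" else ".")
        (by simp [hlen1])
        (pvRows_modify_set _ _ _ _ _ hrows1)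
        ?_]
      · simp [List.map_map, Function.comp_def]
      · intro r c hr hc
        rw [pvCell_modify_set _ (mx - nx + 1).toNat _ _ _ _ _ hrows1, hcell1 r c hr hc]
        have hiff : ((y - ny).toNat = r ∧ (x - nx).toNat = c ∧
            r < (grid.foldl (pvMark nx ny)
              (List.replicate (my - ny + 1).toNat (List.replicate (mx - nx + 1).toNat "."))).length ∧
            c < (mx - nx + 1).toNat) ↔
            (some (x, y) = some (nx + (c : Int), ny + (r : Int))) := by
          rw [hlen1]
          simp only [Option.some_inj, Prod.mk.injEq]
          omega
        rw [if_congr hiff rfl rfl]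
        split <;> rename_i h <;> simp [h]
    · rw [if_neg hin]
      rw [pvGrid_ext _ (my - ny + 1).toNat (mx - nx + 1).toNat
        (fun r c => if some (x, y) = some (nx + (c : Int), ny + (r : Int)) then "O"
          else if (nx + (c : Int), ny + (r : Int)) ∈ grid then "#" else ".")
        hlen1 hrows1 ?_]
      · simp [List.map_map, Function.comp_def]
      · intro r c hr hc
        rw [hcell1 r c hr hc]
        have hne : ¬ (some (x, y) = some (nx + (c : Int), ny + (r : Int))) := by
          simp only [Option.some_inj, Prod.mk.injEq]
          omega
        simp [hne]
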